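-- pv_equiv track=rewrite | github.com/jhnmrtnssn/advent-of-code | 2023/day13/part1.py | cluster_cols_to_int
-- ===== SOURCE A (Python) =====
-- def cluster_cols_to_int(cluster):
--     column_values = []
--     for i in range(0, len(cluster[0])):
--         column = [row[i] for row in cluster]
--         value = 0
--         for j, char in enumerate(reversed(column)):
--             if char == "#":
--                 value += 2**j
--         column_values.append(value)
--     return column_values
-- ===== SOURCE B (Python) =====
-- def cluster_cols_to_int(cluster):
--     # Horner, row-major: one pass over rows; top row is the most significant bit.
--     n = len(cluster[0])
--     column_values = [0] * n
--     for row in cluster: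
--         for i in range(n):
--             column_values[i] = column_values[i] * 2 + (1 if row[i] == "#" else 0)
--     return column_values
-- ===== Notes on version B (the rewrite author's own statement) =====
-- stated objective: alternative
-- what changed: Replaces the column-major loop that materialises each column and sums 2**j over its reversal with a single row-major Horner pass updating all column accumulators (v*2 + bit) per row.
import Mathlib
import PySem

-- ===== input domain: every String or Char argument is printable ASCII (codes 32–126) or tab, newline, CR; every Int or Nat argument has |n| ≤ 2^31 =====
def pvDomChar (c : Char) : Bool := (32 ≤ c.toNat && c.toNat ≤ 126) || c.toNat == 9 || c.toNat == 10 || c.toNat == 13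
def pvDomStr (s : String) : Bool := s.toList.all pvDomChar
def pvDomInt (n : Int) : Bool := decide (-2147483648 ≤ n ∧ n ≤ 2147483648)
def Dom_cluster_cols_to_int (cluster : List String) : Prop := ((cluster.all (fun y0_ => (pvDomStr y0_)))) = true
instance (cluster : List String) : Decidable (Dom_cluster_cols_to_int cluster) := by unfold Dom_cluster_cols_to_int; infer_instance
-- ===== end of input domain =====

-- B replaces A's column-major reversed-power sums by one row-major Horner pass (alternative decomposition, same cost).

-- ===== PORT A =====
-- 2**j is ported as 2 ^ j.toNat (enumerate indices start at 0, so j ≥ 0 always)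
def cluster_cols_to_int (cluster : List String) : List Int :=
  (PySem.List.pyRange 0 (PySem.Str.len (cluster.headD "")) 1).foldl (fun column_values i =>
    let column : List Char := cluster.map (fun row => (PySem.Str.pyGet? row i).getD ' ')
    let value : Int := (PySem.List.enumerate column.reverse 0).foldl
      (fun v jc => if jc.2 = '#' then v + 2 ^ jc.1.toNat else v) 0
    column_values ++ [value]) []

-- ===== PORT B =====
def cluster_cols_to_int_alt (cluster : List String) : List Int :=
  let n : Int := PySem.Str.len (cluster.headD "")
  cluster.foldl (fun column_values row =>
    (PySem.List.pyRange 0 n 1).map (fun i =>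
      PySem.List.pyGetD column_values i 0 * 2 +
        (if (PySem.Str.pyGet? row i).getD ' ' = '#' then 1 else 0)))
    (List.replicate n.toNat 0)

-- ===== PRECONDITION & SPEC =====
-- Pre_ excludes exactly the inputs where Python A raises: the empty cluster (cluster[0] -> IndexError)
-- and clusters containing a row shorter than the first row (row[i] -> IndexError).
def Pre_cluster_cols_to_int (cluster : List String) : Prop :=
  cluster ≠ [] ∧ ∀ row ∈ cluster, PySem.Str.len (cluster.headD "") ≤ PySem.Str.len row
instance (cluster : List String) : Decidable (Pre_cluster_cols_to_int cluster) := by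
  unfold Pre_cluster_cols_to_int; infer_instance
def pvWitness_cluster_cols_to_int : List String := ["#.", ".#", "##"]

def Spec_cluster_cols_to_int (cluster : List String) (out : List Int) : Prop := out = cluster_cols_to_int_alt cluster
instance (cluster : List String) (out : List Int) : Decidable (Spec_cluster_cols_to_int cluster out) := by unfold Spec_cluster_cols_to_int; infer_instance

-- ===== CLAIM (what is proved, stated in full; the proofs are below) =====
def Claim_equal_cluster_cols_to_int : Prop := ∀ (cluster : List String), Dom_cluster_cols_to_int cluster → Pre_cluster_cols_to_int cluster → Spec_cluster_cols_to_int cluster (cluster_cols_to_int cluster)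

-- ===== LEMMAS AND PROOFS =====

-- the character read at column k of a row
def pvCharAt (row : String) (k : Nat) : Char := (PySem.Str.pyGet? row (k : Int)).getD ' '
def pvBit (c : Char) : Int := if c = '#' then 1 else 0
-- Horner value of a char list, most significant first
def pvHorner (cs : List Char) (v : Int) : Int := cs.foldl (fun v c => v * 2 + pvBit c) v

theorem pvHorner_shift (cs : List Char) (v : Int) :
    pvHorner cs v = v * 2 ^ cs.length + pvHorner cs 0 := by
  induction cs generalizing v with
  | nil => simp [pvHorner]
  | cons c cs ih =>
    simp only [pvHorner, List.foldl_cons, List.length_cons] at *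
    rw [ih (v * 2 + pvBit c), ih (0 * 2 + pvBit c)]
    ring

-- A's reversed enumerate-fold equals the Horner value
theorem pvEnumFold_rev (cs : List Char) :
    (PySem.List.enumerate cs.reverse 0).foldl (fun v jc => if jc.2 = '#' then v + 2 ^ jc.1.toNat else v) 0
      = pvHorner cs 0 := by
  induction cs with
  | nil => simp [PySem.List.enumerate_nil, pvHorner]
  | cons c cs ih =>
    rw [show (c :: cs).reverse = cs.reverse ++ [c] by simp]
    rw [PySem.List.enumerate_append, List.foldl_append, ih,
        PySem.List.enumerate_cons, PySem.List.enumerate_nil]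
    simp only [List.foldl_cons, List.foldl_nil, List.length_reverse]
    have h1 : pvHorner (c :: cs) 0 = pvHorner cs (pvBit c) := by simp [pvHorner]
    rw [h1, pvHorner_shift cs (pvBit c)]
    simp only [pvBit, zero_add, Int.toNat_natCast]
    split_ifs <;> ring

-- B's fold over rows, characterised as a map of per-column Horner folds
theorem pvAltFold (rows : List String) (n : Nat) (vals : List Int) (h : vals.length = n) :
    rows.foldl (fun column_values row =>
      (PySem.List.pyRange 0 (n : Int) 1).map (fun i =>
        PySem.List.pyGetD column_values i 0 * 2 +
          (if (PySem.Str.pyGet? row i).getD ' ' = '#' then 1 else 0))) vals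
    = (List.range n).map (fun k =>
        rows.foldl (fun v row => v * 2 + pvBit (pvCharAt row k)) (vals.getD k 0)) := by
  induction rows generalizing vals with
  | nil =>
    simp only [List.foldl_nil]
    refine List.ext_getElem (by simp [h]) ?_
    intro k h1 h2
    have hk : k < n := by omega
    simp [List.getD, List.getElem?_eq_getElem h1]
  | cons r rows ih =>
    rw [List.foldl_cons, ih _ (by simp [PySem.List.pyRange_one])]
    refine List.map_congr_left ?_
    intro k hk
    have hkn : k < n := List.mem_range.mp hk
    rw [List.foldl_cons]
    congr 1
    rw [← PySem.List.pyGetD_natCast, PySem.List.pyGetD_map_pyRange _ n k 0 hkn]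
    simp [pvCharAt, pvBit]

-- A's outer append-fold is a map
theorem pvAppendFold {alpha beta : Type} (f : alpha → beta) (l : List alpha) (acc : List beta) :
    l.foldl (fun a i => a ++ [f i]) acc = acc ++ l.map f := by
  induction l generalizing acc with
  | nil => simp
  | cons x xs ih => simp [ih]

-- ===== VERDICT (by name: the statement is the Claim_ definition above) =====
theorem cluster_cols_to_int_spec : Claim_equal_cluster_cols_to_int := by
  intro cluster _ _
  unfold Spec_cluster_cols_to_int cluster_cols_to_int cluster_cols_to_int_alt
  simp only [PySem.Str.len_eq, Int.toNat_natCast]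
  rw [pvAppendFold, List.nil_append,
      pvAltFold cluster (cluster.headD "").toList.length _ (by simp), PySem.List.pyRange_one]
  simp only [sub_zero, Int.toNat_natCast, List.map_map]
  refine List.map_congr_left ?_
  intro k hk
  simp only [Function.comp_apply, zero_add]
  rw [pvEnumFold_rev, pvHorner, List.foldl_map]
  simp [pvCharAt, pvBit]
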